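-- pv_equiv track=rewrite | github.com/mitmproxy/mitmproxy | mitmproxy/addons/oximy/matcher.py | _matches_query_params
-- ===== SOURCE A (Python) =====
-- def _matches_query_params(query_string: str, required_params: list[str]) -> bool:
--     """
--     Check if query string contains all required parameters.
--
--     Args:
--         query_string: The query string portion of URL (without leading ?)
--         required_params: List of required params, e.g., ["tree=True", "format=json"]
--
--     Returns:
--         True if all required params are present in query string
--     """
--     if not required_params:
--         return True
--
--     # Parse query string into key=value pairs
--     # Handle both "key=value" and just "key" formats
--     query_pairs = set()
--     if query_string:
--         for part in query_string.split("&"):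
--             # Store the full key=value pair for exact matching
--             query_pairs.add(part)
--             # Also store lowercase version for case-insensitive matching
--             query_pairs.add(part.lower())
--
--     # Check each required param
--     for required in required_params:
--         # Check exact match or case-insensitive match
--         if required not in query_pairs and required.lower() not in query_pairs:
--             return False
--
--     return True
-- ===== SOURCE B (Python) =====
-- def _matches_query_params(query_string: str, required_params: list[str]) -> bool:
--     """Inverted-loop rewrite: a single pass over the query parts maintains a
--     shrinking list of still-missing lowercased requirements, with an early
--     True as soon as nothing is missing (no index over the parts is built)."""
--     missing = [r.lower() for r in required_params]
--     for part in (query_string.split("&") if query_string else []):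
--         p = part.lower()
--         missing = [m for m in missing if m != p]
--         if not missing:
--             return True
--     return not missing
-- ===== Notes on version B (the rewrite author's own statement) =====
-- stated objective: alternative
-- what changed: B inverts the loop nesting: instead of A's two passes (index every query part into a set twice, then look up each required param both ways), B makes one pass over the query parts, shrinking a list of still-missing lowercased requirements and returning True as soon as it empties.
import Mathlib
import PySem

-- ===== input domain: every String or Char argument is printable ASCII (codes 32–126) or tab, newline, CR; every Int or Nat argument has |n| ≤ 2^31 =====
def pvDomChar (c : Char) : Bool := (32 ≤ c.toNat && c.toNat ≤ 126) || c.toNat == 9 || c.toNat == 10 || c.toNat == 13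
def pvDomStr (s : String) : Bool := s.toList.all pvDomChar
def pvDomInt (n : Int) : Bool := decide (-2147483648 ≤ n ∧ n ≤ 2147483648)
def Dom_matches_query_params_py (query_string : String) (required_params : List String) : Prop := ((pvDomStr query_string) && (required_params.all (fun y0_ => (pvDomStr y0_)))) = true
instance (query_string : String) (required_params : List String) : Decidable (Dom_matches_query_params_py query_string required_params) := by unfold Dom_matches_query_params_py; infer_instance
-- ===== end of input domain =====

-- B inverts the loop nesting: instead of A's set index over the query parts looked up per
-- requirement, B makes a single pass over the parts, shrinking a list of still-missing
-- lowercased requirements with an early exit (alternative decomposition, same cost class).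


-- ===== PORT A =====
-- 'for required in required_params: if … return False' with early exit
def pvLoopA (query_pairs : PySem.Set String) : List String → Bool
  | [] => true
  | required :: rest =>
      if !(PySem.Set.contains query_pairs required)
          && !(PySem.Set.contains query_pairs (PySem.Str.lower required)) then
        false
      else pvLoopA query_pairs rest

def matches_query_params_py (query_string : String) (required_params : List String) : Bool :=
  if required_params.isEmpty then
    true
  else
    -- query_string.split("&"): split? is none only for sep = "", so getD [] is exact here
    let query_pairs : PySem.Set String :=
      if query_string ≠ "" then
        ((PySem.Str.split? query_string "&").getD []).foldl
          (fun s part => PySem.Set.add (PySem.Set.add s part) (PySem.Str.lower part))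
          PySem.Set.empty
      else PySem.Set.empty
    pvLoopA query_pairs required_params

-- ===== PORT B =====
-- 'for part in parts: missing = [m for m in missing if m != p]; if not missing: return True'
def pvLoopB : List String → List String → Bool
  | missing, [] => missing.isEmpty
  | missing, part :: rest =>
      let p := PySem.Str.lower part
      let missing' := missing.filter (fun m => m ≠ p)
      if missing'.isEmpty then true else pvLoopB missing' rest

def matches_query_params_py_alt (query_string : String) (required_params : List String) : Bool :=
  let missing := required_params.map PySem.Str.lower
  let parts : List String :=
    if query_string ≠ "" then (PySem.Str.split? query_string "&").getD [] else []
  pvLoopB missing parts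

-- ===== PRECONDITION & SPEC =====
def Spec_matches_query_params_py (query_string : String) (required_params : List String) (out : Bool) : Prop := out = matches_query_params_py_alt query_string required_params
instance (query_string : String) (required_params : List String) (out : Bool) : Decidable (Spec_matches_query_params_py query_string required_params out) := by unfold Spec_matches_query_params_py; infer_instance

-- ===== CLAIM (what is proved, stated in full; the proofs are below) =====
def Claim_equal_matches_query_params_py : Prop := ∀ (query_string : String) (required_params : List String), Dom_matches_query_params_py query_string required_params → Spec_matches_query_params_py query_string required_params (matches_query_params_py query_string required_params)

-- ===== LEMMAS AND PROOFS =====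

theorem charOfNat_toNat (n : Nat) (h : n < 128) : (Char.ofNat n).toNat = n := by
  have hv : n.isValidChar := Or.inl (by omega)
  rw [Char.ofNat, dif_pos hv]
  simp [Char.ofNatAux, Char.toNat]

theorem lowerChar_idem (c : Char) :
    PySem.Chars.lowerChar (PySem.Chars.lowerChar c) = PySem.Chars.lowerChar c := by
  unfold PySem.Chars.lowerChar PySem.Chars.isupper
  split_ifs with h1 h2 <;> try rfl
  exfalso
  simp only [Bool.and_eq_true, decide_eq_true_eq, Char.le_def] at h1 h2
  obtain ⟨a1, a2⟩ := h1
  obtain ⟨b1, b2⟩ := h2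
  have hc : c.toNat ≤ 90 := by exact_mod_cast a2
  have hv : (Char.ofNat (c.toNat + 32)).toNat = c.toNat + 32 :=
    charOfNat_toNat _ (by omega)
  have b1' : (65 : Nat) ≤ (Char.ofNat (c.toNat + 32)).toNat := by exact_mod_cast b1
  have b2' : (Char.ofNat (c.toNat + 32)).toNat ≤ 90 := by exact_mod_cast b2
  have hc2 : (65 : Nat) ≤ c.toNat := by exact_mod_cast a1
  omega

theorem lower_idem (s : String) :
    PySem.Str.lower (PySem.Str.lower s) = PySem.Str.lower s := by
  apply String.toList_inj.mp
  simp only [PySem.Str.toList_lower, PySem.Chars.lower, List.map_map]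
  exact List.map_congr_left (fun c _ => lowerChar_idem c)

theorem mem_foldl_add_pair (parts : List String) (s : PySem.Set String) (x : String) :
    x ∈ parts.foldl
        (fun s part => PySem.Set.add (PySem.Set.add s part) (PySem.Str.lower part)) s
      ↔ x ∈ s ∨ ∃ p ∈ parts, x = p ∨ x = PySem.Str.lower p := by
  induction parts generalizing s with
  | nil => simp
  | cons p rest ih =>
      simp only [List.foldl_cons, ih, PySem.Set.mem_add, List.mem_cons]
      constructor
      · rintro (((h | h) | h) | ⟨q, hq, h⟩)
        · exact Or.inl h
        · exact Or.inr ⟨p, Or.inl rfl, Or.inl h⟩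
        · exact Or.inr ⟨p, Or.inl rfl, Or.inr h⟩
        · exact Or.inr ⟨q, Or.inr hq, h⟩
      · rintro (h | ⟨q, (rfl | hq), h⟩)
        · exact Or.inl (Or.inl (Or.inl h))
        · rcases h with h | h
          · exact Or.inl (Or.inl (Or.inr h))
          · exact Or.inl (Or.inr h)
        · exact Or.inr ⟨q, hq, h⟩

-- per-required test: A's two-way set lookup equals a case-insensitive scan of the parts
theorem hit_iff (parts : List String) (r : String) :
    (PySem.Set.contains (parts.foldl
        (fun s part => PySem.Set.add (PySem.Set.add s part) (PySem.Str.lower part))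
        PySem.Set.empty) r
      || PySem.Set.contains (parts.foldl
        (fun s part => PySem.Set.add (PySem.Set.add s part) (PySem.Str.lower part))
        PySem.Set.empty) (PySem.Str.lower r))
    = parts.any (fun part => PySem.Str.lower r == PySem.Str.lower part) := by
  rw [Bool.eq_iff_iff]
  simp only [PySem.Set.contains, List.contains_eq_mem, Bool.or_eq_true, decide_eq_true_eq,
    List.any_eq_true, beq_iff_eq]
  rw [mem_foldl_add_pair, mem_foldl_add_pair]
  simp only [PySem.Set.empty, List.not_mem_nil, false_or]
  constructor
  · rintro (⟨p, hp, h | h⟩ | ⟨p, hp, h | h⟩)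
    · exact ⟨p, hp, by rw [h]⟩
    · exact ⟨p, hp, by rw [h, lower_idem]⟩
    · exact ⟨p, hp, by rw [← h, lower_idem]⟩
    · exact ⟨p, hp, h⟩
  · rintro ⟨p, hp, h⟩
    exact Or.inr ⟨p, hp, Or.inr h⟩

theorem pvLoopA_eq_all (pairs : PySem.Set String) (rp : List String) :
    pvLoopA pairs rp = rp.all (fun r =>
      PySem.Set.contains pairs r || PySem.Set.contains pairs (PySem.Str.lower r)) := by
  induction rp with
  | nil => rfl
  | cons r rest ih =>
      simp only [pvLoopA, List.all_cons, ih]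
      cases h1 : PySem.Set.contains pairs r <;>
        cases h2 : PySem.Set.contains pairs (PySem.Str.lower r) <;> simp

-- B's shrinking-missing loop computes 'every missing item matches some part'
theorem pvLoopB_eq_all (parts missing : List String) :
    pvLoopB missing parts
      = missing.all (fun m => parts.any (fun p => m == PySem.Str.lower p)) := by
  induction parts generalizing missing with
  | nil => cases missing <;> simp [pvLoopB]
  | cons part rest ih =>
      simp only [pvLoopB]
      have hsplit : missing.all (fun m => (part :: rest).any (fun p => m == PySem.Str.lower p))
          = (missing.filter (fun m => m ≠ PySem.Str.lower part)).all
              (fun m => rest.any (fun p => m == PySem.Str.lower p)) := by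
        rw [Bool.eq_iff_iff]
        simp only [List.all_eq_true, List.any_cons, List.mem_filter, Bool.or_eq_true,
          beq_iff_eq, decide_eq_true_eq, ne_eq]
        constructor
        · rintro h m ⟨hm, hne⟩
          rcases h m hm with h' | h'
          · exact absurd h' hne
          · exact h'
        · intro h m hm
          by_cases he : m = PySem.Str.lower part
          · exact Or.inl he
          · exact Or.inr (h m ⟨hm, he⟩)
      split_ifs with hemp
      · rw [hsplit, List.isEmpty_iff.mp hemp]; simp
      · rw [ih, hsplit]

-- ===== VERDICT (by name: the statement is the Claim_ definition above) =====
theorem matches_query_params_py_spec : Claim_equal_matches_query_params_py := by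
  intro qs rp _
  unfold Spec_matches_query_params_py matches_query_params_py matches_query_params_py_alt
  have hmap : ∀ parts : List String,
      (rp.map PySem.Str.lower).all (fun m => parts.any (fun p => m == PySem.Str.lower p))
        = rp.all (fun r => parts.any (fun p => PySem.Str.lower r == PySem.Str.lower p)) := by
    intro parts; rw [List.all_map]; rfl
  split_ifs with hrp hqs
  · rw [pvLoopB_eq_all, List.isEmpty_iff.mp hrp]; rfl
  · rw [pvLoopB_eq_all, List.isEmpty_iff.mp hrp]; rfl
  · rw [pvLoopA_eq_all, pvLoopB_eq_all, hmap]
    exact congrArg rp.all (funext fun r => hit_iff _ r)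
  · rw [pvLoopA_eq_all, pvLoopB_eq_all, hmap]
    simp [PySem.Set.contains, PySem.Set.empty]
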